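-- pv_equiv track=rewrite | github.com/hun23/Daily-Algorithm | PYTHON/class4/13549_숨바꼭질3.py | solve_01bfs
-- ===== SOURCE A (Python) =====
-- from collections import deque
--
-- def solve_01bfs(N, K):
--     visited = [100001] * (100000 + 1)  # 가중치 큰값으로 초기화
--     q = deque()
--     q.append(N)
--     visited[N] = 0
--     while q:
--         cur = q.popleft()
--         if cur == K:
--             return visited[cur]  # 도착하면 가중치 리턴
--
--         # 인덱스 확인 and 현재 경로 가중치 + 필요 가중치 < 다음 경로 가중치
--         # jump first because weight = 0
--         if cur * 2 < 100001 and visited[cur] + 0 < visited[cur * 2]: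
--             visited[cur * 2] = visited[cur]
--             q.appendleft(cur * 2)
--         # move right
--         if cur + 1 < 100001 and visited[cur] + 1 < visited[cur + 1]:
--             visited[cur + 1] = visited[cur] + 1
--             q.append(cur + 1)
--         # move left
--         if cur - 1 >= 0 and visited[cur] + 1 < visited[cur - 1]:
--             visited[cur - 1] = visited[cur] + 1
--             q.append(cur - 1)
--
--     return visited[K]
-- ===== SOURCE B (Python) =====
-- def solve_01bfs(N, K):
--     visited = [100001] * (100000 + 1)
--     visited[N] = 0
--     queue = [N]
--     qi = 0
--     while qi < len(queue):
--         x = queue[qi]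
--         qi += 1
--         while True:
--             if x == K:
--                 return visited[x]
--             jumped = False
--             if x * 2 < 100001 and visited[x] < visited[x * 2]:
--                 visited[x * 2] = visited[x]
--                 jumped = True
--             if x + 1 < 100001 and visited[x] + 1 < visited[x + 1]:
--                 visited[x + 1] = visited[x] + 1
--                 queue.append(x + 1)
--             if x - 1 >= 0 and visited[x] + 1 < visited[x - 1]:
--                 visited[x - 1] = visited[x] + 1
--                 queue.append(x - 1)
--             if jumped:
--                 x = x * 2
--             else:
--                 break
--     return visited[K]
-- ===== Notes on version B (the rewrite author's own statement) =====
-- stated objective: alternative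
-- what changed: Replaces the 0-1 BFS deque (popleft/appendleft/append) by a grow-only list scanned with an index, expanding each 0-cost doubling chain inline in a nested loop instead of re-queueing it at the front.
-- outside the precondition, e.g. on solve_01bfs(-1, -2): A returns 0, B returns 0; on solve_01bfs(-3, -3): A returns 0, B returns 0
import Mathlib
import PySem

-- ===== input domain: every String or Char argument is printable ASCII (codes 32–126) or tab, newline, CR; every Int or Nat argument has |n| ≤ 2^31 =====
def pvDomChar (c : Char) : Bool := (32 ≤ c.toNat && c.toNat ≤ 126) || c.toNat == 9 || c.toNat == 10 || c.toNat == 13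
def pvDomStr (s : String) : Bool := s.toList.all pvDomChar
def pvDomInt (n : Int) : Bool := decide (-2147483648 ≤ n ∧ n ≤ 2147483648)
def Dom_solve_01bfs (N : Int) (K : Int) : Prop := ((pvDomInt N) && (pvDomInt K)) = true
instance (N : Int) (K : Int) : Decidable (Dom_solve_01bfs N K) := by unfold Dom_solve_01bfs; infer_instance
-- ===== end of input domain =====

-- B replaces A's 0-1 BFS deque (popleft/appendleft/append) by a grow-only queue scanned with
-- an index, expanding each 0-cost doubling chain inline in a nested loop; objective: alternative.

-- Shared primitives modelling the Python list `visited` (length 100001) with Python's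
-- negative-index wraparound: exact for -100001 ≤ i ≤ 100000, which Pre_ guarantees for
-- every index either program reads or writes.
def pvVIdx (i : Int) : Nat := if i < 0 then (i + 100001).toNat else i.toNat
def pvVGet (v : Array Int) (i : Int) : Int := v.getD (pvVIdx i) 100001
def pvVSet (v : Array Int) (i : Int) (x : Int) : Array Int := v.setIfInBounds (pvVIdx i) x

-- Fuel: an upper bound on the number of loop iterations (each enqueue beyond the first is
-- preceded by a strict decrease of one of the 100001 entries, each starting at 100001);
-- Python always terminates well within it, so the exhaustion fallback (-1) is never reached.
def pvFuel : Nat := 1000000000000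

-- Fuel-indexed loop runner, shared totality device of both ports: applies `step` n times
-- (or until it returns `.inr result`), by binary fuel splitting so that the evaluation
-- stack stays O(log n).  pvRun_eq below is its only interface: n iterated small steps.
def pvStep1 {σ : Type} (step : σ → σ ⊕ Int) : σ ⊕ Int → σ ⊕ Int
  | .inl s => step s
  | .inr r => .inr r

def pvRun {σ : Type} (step : σ → σ ⊕ Int) (n : Nat) (s : σ ⊕ Int) : σ ⊕ Int :=
  if n = 0 then s
  else
    match s with
    | .inr r => .inr r
    | .inl a =>
      let t := pvRun step (n / 2) (.inl a)
      let t := if n % 2 = 1 then pvStep1 step t else t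
      pvRun step (n / 2) t
termination_by n
decreasing_by all_goals omega

-- ===== PORT A =====
-- collections.deque ported as a front list + reversed back list (list view = fst ++ snd.reverse),
-- the standard O(1)-amortised two-list deque; popleft/append/appendleft are deque's own ops.
def pvPopleft? (d : List Int × List Int) : Option (Int × (List Int × List Int)) :=
  match d with
  | (x :: f, b) => some (x, (f, b))
  | ([], b) =>
    match b.reverse with
    | [] => none
    | x :: f => some (x, (f, []))

def pvAppend (d : List Int × List Int) (u : Int) : List Int × List Int := (d.1, u :: d.2)

def pvAppendleft (d : List Int × List Int) (u : Int) : List Int × List Int := (u :: d.1, d.2)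

-- one iteration of A's `while q:` loop: state (visited, q); `.inr r` = `return r`
def pvStepA (K : Int) (s : Array Int × (List Int × List Int)) :
    (Array Int × (List Int × List Int)) ⊕ Int :=
  let (v, q) := s
  match pvPopleft? q with
  | none => .inr (pvVGet v K)
  | some (cur, q) =>
    if cur = K then .inr (pvVGet v cur)
    else
      let (v, q) :=
        if cur * 2 < 100001 ∧ pvVGet v cur + 0 < pvVGet v (cur * 2) then
          (pvVSet v (cur * 2) (pvVGet v cur), pvAppendleft q (cur * 2))
        else (v, q)
      let (v, q) :=
        if cur + 1 < 100001 ∧ pvVGet v cur + 1 < pvVGet v (cur + 1) then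
          (pvVSet v (cur + 1) (pvVGet v cur + 1), pvAppend q (cur + 1))
        else (v, q)
      let (v, q) :=
        if cur - 1 ≥ 0 ∧ pvVGet v cur + 1 < pvVGet v (cur - 1) then
          (pvVSet v (cur - 1) (pvVGet v cur + 1), pvAppend q (cur - 1))
        else (v, q)
      .inl (v, q)

def solve_01bfs (N : Int) (K : Int) : Int :=
  let visited : Array Int := Array.replicate 100001 100001
  let q : List Int × List Int := ([], [])
  let q := pvAppend q N
  let visited := pvVSet visited N 0
  match pvRun (pvStepA K) pvFuel (.inl (visited, q)) with
  | .inr r => r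
  | .inl _ => -1

-- ===== PORT B =====
-- B's queue is a Python list only ever appended to and scanned by the index qi: an Array here.
-- State (visited, queue, qi, m): m = some x means control is inside the inner `while True:`
-- chain loop about to process x; m = none means control is back at the outer loop test.
-- One body of the inner loop (including, on its first round, the pop that fed it) = one step.
def pvChainStep (K : Int) (v : Array Int) (x : Int) (qB : Array Int) (qi : Nat) :
    (Array Int × Array Int × Nat × Option Int) ⊕ Int :=
  if x = K then .inr (pvVGet v x)
  else
    let (v, jumped) :=
      if x * 2 < 100001 ∧ pvVGet v x < pvVGet v (x * 2) then
        (pvVSet v (x * 2) (pvVGet v x), true)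
      else (v, false)
    let (v, qB) :=
      if x + 1 < 100001 ∧ pvVGet v x + 1 < pvVGet v (x + 1) then
        (pvVSet v (x + 1) (pvVGet v x + 1), qB.push (x + 1))
      else (v, qB)
    let (v, qB) :=
      if x - 1 ≥ 0 ∧ pvVGet v x + 1 < pvVGet v (x - 1) then
        (pvVSet v (x - 1) (pvVGet v x + 1), qB.push (x - 1))
      else (v, qB)
    .inl (v, qB, qi, if jumped then some (x * 2) else none)

def pvStepB (K : Int) (s : Array Int × Array Int × Nat × Option Int) :
    (Array Int × Array Int × Nat × Option Int) ⊕ Int :=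
  let (v, qB, qi, m) := s
  match m with
  | some x => pvChainStep K v x qB qi
  | none =>
    if h : qi < qB.size then pvChainStep K v qB[qi] qB (qi + 1)
    else .inr (pvVGet v K)

def solve_01bfs_alt (N : Int) (K : Int) : Int :=
  let visited : Array Int := Array.replicate 100001 100001
  let visited := pvVSet visited N 0
  match pvRun (pvStepB K) pvFuel (.inl (visited, #[N], 0, none)) with
  | .inr r => r
  | .inl _ => -1

-- ===== PRECONDITION & SPEC =====
-- Pre_ excludes N outside [0,100000] (there Python indexes `visited` out of range: every run
-- with N < 0 ends in an IndexError once the 0-cost doubling chain leaves [-100001, 100000],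
-- except for accidental early returns when K happens to lie on that wraparound chain, where
-- both A and B return the same accidental value) and K outside [-100001,100000] (IndexError).
def Pre_solve_01bfs (N : Int) (K : Int) : Prop :=
  0 ≤ N ∧ N ≤ 100000 ∧ -100001 ≤ K ∧ K ≤ 100000
instance (N : Int) (K : Int) : Decidable (Pre_solve_01bfs N K) := by
  unfold Pre_solve_01bfs; infer_instance
def pvWitness_solve_01bfs : Int × Int := (5, 17)

def Spec_solve_01bfs (N : Int) (K : Int) (out : Int) : Prop := out = solve_01bfs_alt N K
instance (N : Int) (K : Int) (out : Int) : Decidable (Spec_solve_01bfs N K out) := by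
  unfold Spec_solve_01bfs; infer_instance

-- ===== CLAIM (what is proved, stated in full; the proofs are below) =====
def Claim_equal_solve_01bfs : Prop :=
  ∀ (N : Int) (K : Int), Dom_solve_01bfs N K → Pre_solve_01bfs N K →
    Spec_solve_01bfs N K (solve_01bfs N K)

-- ===== LEMMAS AND PROOFS =====

-- the runner is just n iterations of the single step
lemma pvRun_eq {σ : Type} (step : σ → σ ⊕ Int) (n : Nat) (s : σ ⊕ Int) :
    pvRun step n s = (pvStep1 step)^[n] s := by
  induction n using Nat.strong_induction_on generalizing s with
  | _ n ih =>
    rw [pvRun.eq_def]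
    by_cases h0 : n = 0
    · simp [h0]
    · rw [if_neg h0]
      match s with
      | .inr r =>
        dsimp only
        rw [Function.iterate_fixed rfl n]
      | .inl a =>
        dsimp only
        rw [ih (n / 2) (by omega), ih (n / 2) (by omega)]
        have hsplit : ∀ t : σ ⊕ Int,
            (if n % 2 = 1 then pvStep1 step t else t) = (pvStep1 step)^[n % 2] t := by
          intro t
          rcases Nat.mod_two_eq_zero_or_one n with h | h <;> simp [h]
        rw [hsplit, ← Function.iterate_add_apply, ← Function.iterate_add_apply]
        congr 1
        omega

-- simulation relation between A's running state and B's running state: same visited array,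
-- and the deque's list view is B's unscanned queue tail, preceded by the pending chain node
def pvR (a : Array Int × (List Int × List Int)) (b : Array Int × Array Int × Nat × Option Int) :
    Prop :=
  a.1 = b.1 ∧ b.2.2.1 ≤ b.2.1.size ∧
    a.2.1 ++ a.2.2.reverse =
      (match b.2.2.2 with
       | some x => x :: b.2.1.toList.drop b.2.2.1
       | none => b.2.1.toList.drop b.2.2.1)

-- simulation relation on step results: both returned the same value, or both still running
def pvStR (a : (Array Int × (List Int × List Int)) ⊕ Int)
    (b : (Array Int × Array Int × Nat × Option Int) ⊕ Int) : Prop :=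
  (∃ r, a = .inr r ∧ b = .inr r) ∨ (∃ s t, a = .inl s ∧ b = .inl t ∧ pvR s t)

-- the deque's list view after a back-append, pushed through the queue-tail invariant
lemma pvInvPush (fr bk : List Int) (qB : Array Int) (qi : Nat) (u : Int)
    (h : fr ++ bk.reverse = qB.toList.drop qi) (hle : qi ≤ qB.size) :
    fr ++ ((u :: bk).reverse) = (qB.push u).toList.drop qi := by
  have : qi ≤ qB.toList.length := by simpa using hle
  simp [Array.toList_push, List.drop_append_of_le_length this, ← h, List.append_assoc]

-- popping the deque is determined by its list view
lemma pvPop_of_view (d : List Int × List Int) (x : Int) (l : List Int)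
    (h : d.1 ++ d.2.reverse = x :: l) :
    ∃ d', pvPopleft? d = some (x, d') ∧ d'.1 ++ d'.2.reverse = l := by
  obtain ⟨fr, bk⟩ := d
  cases fr with
  | cons y f =>
    simp only [List.cons_append, List.cons_eq_cons] at h
    exact ⟨(f, bk), by simp [pvPopleft?, h.1], h.2⟩
  | nil =>
    simp only [List.nil_append] at h
    exact ⟨(l, []), by simp [pvPopleft?, h], by simp⟩

lemma pvPop_of_view_nil (d : List Int × List Int) (h : d.1 ++ d.2.reverse = []) :
    pvPopleft? d = none := by
  obtain ⟨fr, bk⟩ := d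
  cases fr with
  | cons y f => simp at h
  | nil =>
    have hbk : bk = [] := by simpa using h
    subst hbk
    rfl

-- central step lemma: processing the popped node x in A is processing the chain node x in B
lemma pvChainSim (K : Int) (v : Array Int) (x : Int) (d d' : List Int × List Int)
    (qB : Array Int) (qi : Nat) (hpop : pvPopleft? d = some (x, d'))
    (hview : d'.1 ++ d'.2.reverse = qB.toList.drop qi) (hle : qi ≤ qB.size) :
    pvStR (pvStepA K (v, d)) (pvChainStep K v x qB qi) := by
  unfold pvStepA pvChainStep
  simp only [hpop, Int.add_zero]
  by_cases hK : x = K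
  · subst hK
    simp only [if_pos]
    exact Or.inl ⟨_, rfl, rfl⟩
  · simp only [if_neg hK]
    split_ifs with h1 h2 h3 h4 h5 h6 h7 h8 h9 h10 h11 h12 h13 h14 <;>
      first
        | contradiction
        | (refine Or.inr ⟨_, _, rfl, rfl, rfl, ?_, ?_⟩
           · try simp only [Array.size_push]
             omega
           · dsimp only [pvAppend, pvAppendleft]
             try simp only [List.cons_append, List.cons.injEq, true_and]
             repeat' first
               | exact hview
               | exact hle
               | apply pvInvPush
             all_goals try simp only [Array.size_push]
             all_goals omega)

-- one synchronised step preserves the simulation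
lemma pvStepSim (K : Int) (a : Array Int × (List Int × List Int))
    (b : Array Int × Array Int × Nat × Option Int) (hR : pvR a b) :
    pvStR (pvStepA K a) (pvStepB K b) := by
  obtain ⟨v, d⟩ := a
  obtain ⟨v', qB, qi, m⟩ := b
  obtain ⟨hv, hle, hview⟩ := hR
  simp only at hv hle hview
  subst hv
  match m with
  | some x =>
    obtain ⟨d', hpop, hview'⟩ := pvPop_of_view d x _ hview
    exact pvChainSim K v x d d' qB qi hpop hview' hle
  | none =>
    rw [pvStepB]
    by_cases hq : qi < qB.size
    · have hq' : qi < qB.toList.length := by simpa using hq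
      rw [List.drop_eq_getElem_cons hq'] at hview
      simp only [Array.getElem_toList] at hview
      obtain ⟨d', hpop, hview'⟩ := pvPop_of_view d qB[qi] _ hview
      simp only [dif_pos hq]
      exact pvChainSim K v qB[qi] d d' qB (qi + 1) hpop hview' (by omega)
    · have : qB.toList.drop qi = [] :=
        List.drop_eq_nil_of_le (by simpa using Nat.le_of_not_lt hq)
      rw [this] at hview
      rw [pvStepA]
      simp only [pvPop_of_view_nil d hview, dif_neg hq]
      exact Or.inl ⟨_, rfl, rfl⟩

-- the simulation is preserved by any number of steps
lemma pvIterSim (K : Int) (n : Nat) (a : (Array Int × (List Int × List Int)) ⊕ Int)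
    (b : (Array Int × Array Int × Nat × Option Int) ⊕ Int) (h : pvStR a b) :
    pvStR ((pvStep1 (pvStepA K))^[n] a) ((pvStep1 (pvStepB K))^[n] b) := by
  induction n generalizing a b with
  | zero => exact h
  | succ n ih =>
    rw [Function.iterate_succ_apply, Function.iterate_succ_apply]
    apply ih
    rcases h with ⟨r, ha, hb⟩ | ⟨s', t', ha, hb, hR⟩
    · subst ha; subst hb; exact Or.inl ⟨r, rfl, rfl⟩
    · subst ha; subst hb; exact pvStepSim K s' t' hR

-- ===== VERDICT (by name: the statement is the Claim_ definition above) =====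
theorem solve_01bfs_spec : Claim_equal_solve_01bfs := by
  intro N K _ _
  unfold Spec_solve_01bfs solve_01bfs solve_01bfs_alt
  dsimp only
  have h0 : pvStR (.inl (pvVSet (Array.replicate 100001 100001) N 0, pvAppend ([], []) N))
      (.inl (pvVSet (Array.replicate 100001 100001) N 0, #[N], 0, none)) := by
    refine Or.inr ⟨_, _, rfl, rfl, rfl, by simp, ?_⟩
    simp [pvAppend]
  have h := pvIterSim K pvFuel _ _ h0
  rw [← pvRun_eq, ← pvRun_eq] at h
  rcases h with ⟨r, ha, hb⟩ | ⟨s, t, ha, hb, -⟩ <;> rw [ha, hb]
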